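-- pv_equiv track=rewrite | github.com/kaczla/list-lm | list_lm/parse_lm_data.py | group_into_model_info_data
-- ===== SOURCE A (Python) =====
-- def group_into_model_info_data(text: list[str], prefix_elements_separator: str = "- ") -> list[list[str]]:
--     elements_text: list[list[str]] = []
--     element_text: list[str] = []
--     for line in text:
--         if line.startswith(prefix_elements_separator) and element_text:
--             elements_text.append(element_text)
--             element_text = []
--
--         element_text.append(line)
--
--     if element_text:
--         elements_text.append(element_text)
--         del element_text
--
--     return elements_text
-- ===== SOURCE B (Python) =====
-- def group_into_model_info_data(text: list[str], prefix_elements_separator: str = "- ") -> list[list[str]]: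
--     groups: list[list[str]] = []
--     i = 0
--     n = len(text)
--     while i < n:
--         j = i + 1
--         while j < n and not text[j].startswith(prefix_elements_separator):
--             j += 1
--         groups.append(text[i:j])
--         i = j
--     return groups
-- ===== Notes on version B (the rewrite author's own statement) =====
-- stated objective: alternative
-- what changed: Replaces A's stateful accumulator (current-group buffer flushed when a separator line arrives, plus a final flush) with a two-pointer index scan: for each group start i, scan forward to the next separator line j and emit the slice text[i:j] directly.
import Mathlib
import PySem

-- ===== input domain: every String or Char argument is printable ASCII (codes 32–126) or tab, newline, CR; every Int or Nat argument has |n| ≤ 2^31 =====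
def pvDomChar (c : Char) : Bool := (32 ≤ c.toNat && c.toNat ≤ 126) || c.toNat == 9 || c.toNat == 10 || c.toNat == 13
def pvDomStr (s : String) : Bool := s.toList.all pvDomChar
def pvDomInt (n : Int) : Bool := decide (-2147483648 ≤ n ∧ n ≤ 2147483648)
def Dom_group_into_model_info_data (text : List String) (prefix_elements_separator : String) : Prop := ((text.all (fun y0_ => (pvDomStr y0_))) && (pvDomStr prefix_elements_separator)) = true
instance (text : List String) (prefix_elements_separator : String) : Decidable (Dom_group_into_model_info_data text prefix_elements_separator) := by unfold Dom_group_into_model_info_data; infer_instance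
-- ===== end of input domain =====

-- B replaces A's flush-on-separator accumulator with a two-pointer index scan emitting slices; same return value on all inputs.


-- ===== PORT A =====
def pvAGo (sep : String) (es : List (List String)) (e : List String) : List String → List (List String)
  | [] => if e ≠ [] then es ++ [e] else es
  | line :: rest =>
    if PySem.Str.startswith line sep ∧ e ≠ [] then
      pvAGo sep (es ++ [e]) [line] rest
    else
      pvAGo sep es (e ++ [line]) rest

def group_into_model_info_data (text : List String) (prefix_elements_separator : String) : List (List String) :=
  pvAGo prefix_elements_separator [] [] text

-- ===== PORT B =====
-- B's inner while: first index j' ≥ j with text[j'] starting with sep (or text.length)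
def pvScan (text : List String) (sep : String) (j : Nat) : Nat :=
  if h : j < text.length then
    if PySem.Str.startswith text[j] sep then j else pvScan text sep (j + 1)
  else j
termination_by text.length - j

-- cited by pvBLoop's decreasing_by (termination of B's outer while)
theorem pvScan_ge (text : List String) (sep : String) (j : Nat) : j ≤ pvScan text sep j := by
  unfold pvScan
  split
  · split
    · exact le_refl j
    · exact Nat.le_of_succ_le (pvScan_ge text sep (j + 1))
  · exact le_refl j
termination_by text.length - j

-- B's outer while: emit text[i:j] per group, then continue at i = j
def pvBLoop (text : List String) (sep : String) (i : Nat) (groups : List (List String)) : List (List String) :=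
  if h : i < text.length then
    let j := pvScan text sep (i + 1)
    pvBLoop text sep j (groups ++ [PySem.List.slice text (some (i : Int)) (some (j : Int))])
  else groups
termination_by text.length - i
decreasing_by have := pvScan_ge text sep (i + 1); omega

def group_into_model_info_data_alt (text : List String) (prefix_elements_separator : String) : List (List String) :=
  pvBLoop text prefix_elements_separator 0 []

-- ===== PRECONDITION & SPEC =====
def Spec_group_into_model_info_data (text : List String) (prefix_elements_separator : String) (out : List (List String)) : Prop := out = group_into_model_info_data_alt text prefix_elements_separator
instance (text : List String) (prefix_elements_separator : String) (out : List (List String)) : Decidable (Spec_group_into_model_info_data text prefix_elements_separator out) := by unfold Spec_group_into_model_info_data; infer_instance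

-- ===== CLAIM (what is proved, stated in full; the proofs are below) =====
def Claim_equal_group_into_model_info_data : Prop := ∀ (text : List String) (prefix_elements_separator : String), Dom_group_into_model_info_data text prefix_elements_separator → Spec_group_into_model_info_data text prefix_elements_separator (group_into_model_info_data text prefix_elements_separator)

-- ===== LEMMAS AND PROOFS =====

-- common normal form: groups are maximal runs, each headed by a line that (except the first) starts with sep
def pvSpanGroups (sep : String) : List String → List (List String)
  | [] => []
  | x :: xs =>
    (x :: xs.takeWhile (fun l => !PySem.Str.startswith l sep)) ::
      pvSpanGroups sep (xs.dropWhile (fun l => !PySem.Str.startswith l sep))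
termination_by l => l.length
decreasing_by simpa using Nat.lt_succ_of_le (List.length_dropWhile_le _ xs)

theorem pvSpanGroups_cons (sep x : String) (xs : List String) :
    pvSpanGroups sep (x :: xs) =
      (x :: xs.takeWhile (fun l => !PySem.Str.startswith l sep)) ::
        pvSpanGroups sep (xs.dropWhile (fun l => !PySem.Str.startswith l sep)) := by
  rw [pvSpanGroups]

theorem pvTake_takeWhile {a : Type} (p : a -> Bool) : forall xs : List a, xs.take (xs.takeWhile p).length = xs.takeWhile p
  | [] => by simp
  | x :: xs => by
    rw [List.takeWhile_cons]
    by_cases h : p x = true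
    . rw [if_pos h, List.length_cons, List.take_succ_cons, pvTake_takeWhile p xs]
    . rw [if_neg h]; simp

theorem pvDrop_takeWhile {a : Type} (p : a -> Bool) : forall xs : List a, xs.drop (xs.takeWhile p).length = xs.dropWhile p
  | [] => by simp
  | x :: xs => by
    rw [List.takeWhile_cons, List.dropWhile_cons]
    by_cases h : p x = true
    . rw [if_pos h, if_pos h, List.length_cons, List.drop_succ_cons, pvDrop_takeWhile p xs]
    . rw [if_neg h, if_neg h]; simp

-- ---- A = pvSpanGroups, via a foldr view of A's loop ----
def pvAltStep (sep line : String) (groups : List (List String)) : List (List String) :=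
  match groups with
  | [] => [[line]]
  | g :: gs =>
    if PySem.Str.startswith (g.headD "") sep then [line] :: g :: gs
    else (line :: g) :: gs

def pvMergeFront (e : List String) : List (List String) → List (List String)
  | [] => [e]
  | g :: gs => (e ++ g) :: gs

theorem pvAlt_head (sep y : String) (ys : List String) :
    ∃ t gs, (y :: ys).foldr (pvAltStep sep) [] = (y :: t) :: gs := by
  rw [List.foldr_cons]
  cases h : ys.foldr (pvAltStep sep) [] with
  | nil => exact ⟨[], [], by rw [pvAltStep]⟩
  | cons g gs =>
    rw [pvAltStep]
    by_cases hs : PySem.Str.startswith (g.headD "") sep = true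
    · exact ⟨[], g :: gs, by rw [if_pos hs]⟩
    · exact ⟨g, gs, by rw [if_neg hs]⟩

theorem pvAltStep_char (sep line : String) (rs : List String) :
    pvAltStep sep line (rs.foldr (pvAltStep sep) []) =
      if rs ≠ [] ∧ PySem.Str.startswith (rs.headD "") sep = true then
        [line] :: rs.foldr (pvAltStep sep) []
      else pvMergeFront [line] (rs.foldr (pvAltStep sep) []) := by
  cases rs with
  | nil => rw [List.foldr_nil, pvAltStep, if_neg (by simp), pvMergeFront]
  | cons y ys =>
    obtain ⟨t, gs, h⟩ := pvAlt_head sep y ys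
    rw [h, pvAltStep, List.headD_cons, List.headD_cons]
    by_cases hs : PySem.Str.startswith y sep = true
    · rw [if_pos hs, if_pos ⟨List.cons_ne_nil y ys, hs⟩]
    · rw [if_neg hs, if_neg (fun hh => hs hh.2), pvMergeFront, List.singleton_append]

theorem pvAGo_append (sep : String) (rest : List String) :
    ∀ es e, pvAGo sep es e rest = es ++ pvAGo sep [] e rest := by
  induction rest with
  | nil => intro es e; by_cases h : e = [] <;> simp [pvAGo, h]
  | cons line rs ih =>
    intro es e
    by_cases h : PySem.Str.startswith line sep = true ∧ e ≠ []
    · rw [pvAGo, if_pos h, pvAGo, if_pos h, ih (es ++ [e]) [line], ih ([] ++ [e]) [line]]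
      simp
    · rw [pvAGo, if_neg h, pvAGo, if_neg h, ih]

theorem pvAGo_alt (sep : String) (rest : List String) :
    ∀ e, e ≠ [] →
      pvAGo sep [] e rest =
        if rest ≠ [] ∧ PySem.Str.startswith (rest.headD "") sep = true then
          e :: rest.foldr (pvAltStep sep) []
        else pvMergeFront e (rest.foldr (pvAltStep sep) []) := by
  induction rest with
  | nil => intro e he; rw [pvAGo, if_pos he, if_neg (by simp), List.foldr_nil, pvMergeFront]; rfl
  | cons line rs ih =>
    intro e he
    rw [List.headD_cons, List.foldr_cons, pvAltStep_char sep line rs]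
    by_cases hs : PySem.Str.startswith line sep = true
    · rw [pvAGo, if_pos ⟨hs, he⟩, pvAGo_append, ih [line] (List.cons_ne_nil line []),
        if_pos (show (line :: rs) ≠ [] ∧ PySem.Str.startswith line sep = true from
          ⟨List.cons_ne_nil line rs, hs⟩)]
      by_cases hc : rs ≠ [] ∧ PySem.Str.startswith (rs.headD "") sep = true
      · rw [if_pos hc]; simp
      · rw [if_neg hc]; simp
    · rw [pvAGo, if_neg (fun hh => hs hh.1), ih (e ++ [line]) (by simp),
        if_neg (show ¬((line :: rs) ≠ [] ∧ PySem.Str.startswith line sep = true) from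
          fun hh => hs hh.2)]
      by_cases hc : rs ≠ [] ∧ PySem.Str.startswith (rs.headD "") sep = true
      · rw [if_pos hc, if_pos hc]; simp [pvMergeFront]
      · rw [if_neg hc, if_neg hc]
        cases h : rs.foldr (pvAltStep sep) [] with
        | nil => simp [pvMergeFront]
        | cons g gs => simp [pvMergeFront]

theorem pvFoldr_span (sep : String) (text : List String) :
    text.foldr (pvAltStep sep) [] = pvSpanGroups sep text := by
  induction text with
  | nil => rw [List.foldr_nil, pvSpanGroups]
  | cons x xs ih =>
    rw [List.foldr_cons, ih]
    cases xs with
    | nil => rw [pvSpanGroups, pvSpanGroups_cons]; simp [pvAltStep, pvSpanGroups]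
    | cons y ys =>
      rw [pvSpanGroups_cons sep y ys, pvAltStep, List.headD_cons,
        pvSpanGroups_cons sep x (y :: ys), List.takeWhile_cons, List.dropWhile_cons]
      by_cases hs : PySem.Str.startswith y sep = true
      . rw [if_pos hs]
        simp only [PySem.Str.startswith] at hs
        simp [hs, pvSpanGroups_cons]
      . rw [if_neg hs]
        simp only [PySem.Str.startswith] at hs
        simp [hs]

theorem pvA_span (sep : String) (text : List String) :
    group_into_model_info_data text sep = pvSpanGroups sep text := by
  rw [← pvFoldr_span]
  cases text with
  | nil => rw [group_into_model_info_data, pvAGo, if_neg (by simp), List.foldr_nil]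
  | cons line rs =>
    rw [group_into_model_info_data, pvAGo, if_neg (by simp), List.nil_append,
      pvAGo_alt sep rs [line] (by simp), List.foldr_cons, pvAltStep_char sep line rs]

-- ---- B = pvSpanGroups ----
theorem pvScan_char (text : List String) (sep : String) (j : Nat) :
    pvScan text sep j = j + ((text.drop j).takeWhile (fun l => !PySem.Str.startswith l sep)).length := by
  unfold pvScan
  split
  . rename_i h
    rw [List.drop_eq_getElem_cons h, List.takeWhile_cons]
    by_cases hs : PySem.Str.startswith text[j] sep = true
    . rw [if_pos hs, if_neg (by simpa [PySem.Str.startswith] using hs), List.length_nil]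
      omega
    . rw [if_neg hs, pvScan_char text sep (j + 1), if_pos (by simpa [PySem.Str.startswith] using hs),
        List.length_cons]
      omega
  . rename_i h
    rw [List.drop_eq_nil_of_le (by omega)]
    simp
termination_by text.length - j

theorem pvBLoop_span (text : List String) (sep : String) (i : Nat) (groups : List (List String)) :
    pvBLoop text sep i groups = groups ++ pvSpanGroups sep (text.drop i) := by
  unfold pvBLoop
  split
  · rename_i h
    have hscan := pvScan_char text sep (i + 1)
    set t := (text.drop (i + 1)).takeWhile (fun l => !PySem.Str.startswith l sep) with ht
    have hj : pvScan text sep (i + 1) = i + 1 + t.length := hscan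
    have hslice : PySem.List.slice text (some (i : Int)) (some ((pvScan text sep (i + 1) : Nat) : Int))
        = text[i] :: t := by
      rw [PySem.List.slice_natCast, hj, List.drop_eq_getElem_cons h]
      have : i + 1 + t.length - i = t.length + 1 := by omega
      rw [this, List.take_succ_cons]
      congr 1
      rw [ht]
      exact pvTake_takeWhile _ _
    have hdrop : text.drop (pvScan text sep (i + 1))
        = (text.drop (i + 1)).dropWhile (fun l => !PySem.Str.startswith l sep) := by
      rw [hj, ← List.drop_drop, ht, pvDrop_takeWhile]
    rw [pvBLoop_span text sep (pvScan text sep (i + 1)) _, hdrop, hslice,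
      List.drop_eq_getElem_cons h, pvSpanGroups_cons]
    simp [ht]
  · rename_i h
    rw [List.drop_eq_nil_of_le (by omega), pvSpanGroups, List.append_nil]
termination_by text.length - i
decreasing_by have := pvScan_ge text sep (i + 1); omega

-- ===== VERDICT (by name: the statement is the Claim_ definition above) =====
theorem group_into_model_info_data_spec : Claim_equal_group_into_model_info_data := by
  intro text sep _
  unfold Spec_group_into_model_info_data group_into_model_info_data_alt
  rw [pvBLoop_span, List.nil_append, List.drop_zero, pvA_span]
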